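-- pv_equiv track=rewrite | github.com/rbashirov/Codility | 11-sieve_of_eratosthenes/CountSemiprimes.py | semi_primes
-- ===== SOURCE A (Python) =====
-- def semi_primes(N):
--     result = set()
--     sieve = [1]*(N+1)
--     c = 2
--     sieve[0], sieve[1] = 0,0
--     while c*c<(N+1):
--         if sieve[c] == 1:
--             for i in range(c*c,(N+1),c):
--                 sieve[i] = 0
--         c+=1
--     c=2
--     while c*c<(N+1):
--         if sieve[c]==1:
--             for i in range(c*c,(N+1),c):
--                 if i%c==0 and sieve[int(i/c)] == 1:
--                     result.add(i)
--         c+=1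
--     return result
-- ===== SOURCE B (Python) =====
-- def _is_prime(p):
--     d = 2
--     while d * d <= p:
--         if p % d == 0:
--             return False
--         d += 1
--     return p >= 2
--
--
-- def semi_primes(N):
--     # Enumerate semiprimes directly as products p*q of primes p <= q,
--     # instead of sieving and testing the quotient of every multiple.
--     primes = [p for p in range(2, N + 1) if _is_prime(p)]
--     result = []
--     for i in range(len(primes)):
--         p = primes[i]
--         if p * p > N:
--             break
--         for q in primes[i:]:
--             if p * q > N:
--                 break
--             result.append(p * q)
--     return set(result)
-- ===== Notes on version B (the rewrite author's own statement) =====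
-- stated objective: alternative
-- what changed: A sieves [0..N] twice (mark composites, then re-scan every multiple i of each prime c and test the sieve at i/c); B instead builds the prime list by trial division and directly enumerates the products p*q of primes p <= q with p*q <= N, never touching a sieve array.
-- outside the precondition, e.g. on semi_primes(0): A raises IndexError, B returns set()
import Mathlib
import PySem

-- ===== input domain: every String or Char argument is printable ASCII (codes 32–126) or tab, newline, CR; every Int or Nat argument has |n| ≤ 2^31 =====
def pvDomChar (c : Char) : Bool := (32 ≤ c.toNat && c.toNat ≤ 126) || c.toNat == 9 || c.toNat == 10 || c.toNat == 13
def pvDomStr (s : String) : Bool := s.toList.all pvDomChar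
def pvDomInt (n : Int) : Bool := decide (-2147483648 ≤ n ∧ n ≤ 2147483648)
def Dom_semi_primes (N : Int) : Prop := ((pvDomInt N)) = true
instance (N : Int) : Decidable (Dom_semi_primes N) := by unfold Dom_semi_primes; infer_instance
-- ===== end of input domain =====

-- B replaces A's two sieve passes (mark multiples, then re-scan multiples testing the quotient
-- against the sieve) by trial-division primality plus direct enumeration of products p*q of
-- primes p ≤ q; objective: alternative (not faster). Equality is on the returned set's list.

-- ===== PORT A =====
-- while c*c < N+1: if sieve[c]==1: for i in range(c*c, N+1, c): sieve[i] = 0 ; c += 1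
def pvMark (N : Int) (sieve : List Int) (c : Int) : List Int :=
  if h : c * c < N + 1 then
    pvMark N
      (if PySem.List.pyGetD sieve c 0 == 1 then
        (PySem.List.pyRange (c * c) (N + 1) c).foldl (fun s i => PySem.List.pySetD s i 0) sieve
       else sieve)
      (c + 1)
  else sieve
termination_by (N + 1 - c).toNat
decreasing_by
  have hc : c < N + 1 := by nlinarith [mul_self_nonneg c, mul_self_nonneg (c - 1)]
  omega

-- second while loop; `int(i/c)` is float division in Python: exact (= truncating division) on the
-- |n| ≤ 2^31 domain, ported as PySem.Int.truncdiv.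
def pvCollect (N : Int) (sieve : List Int) (c : Int) (result : PySem.Set Int) : PySem.Set Int :=
  if h : c * c < N + 1 then
    pvCollect N sieve (c + 1)
      (if PySem.List.pyGetD sieve c 0 == 1 then
        (PySem.List.pyRange (c * c) (N + 1) c).foldl
          (fun r i =>
            if PySem.Int.mod i c == 0 &&
                (PySem.List.pyGetD sieve (PySem.Int.truncdiv i c) 0 == 1) then
              PySem.Set.add r i
            else r)
          result
       else result)
  else result
termination_by (N + 1 - c).toNat
decreasing_by
  have hc : c < N + 1 := by nlinarith [mul_self_nonneg c, mul_self_nonneg (c - 1)]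
  omega

def semi_primes (N : Int) : List Int :=
  let sieve0 : List Int := List.replicate (N + 1).toNat 1
  let sieve1 := PySem.List.pySetD (PySem.List.pySetD sieve0 0 0) 1 0
  let sieve2 := pvMark N sieve1 2
  pvCollect N sieve2 2 PySem.Set.empty

-- ===== PORT B =====
-- while d*d <= p: if p % d == 0: return False ; d += 1 ; return p >= 2
def pvTrial (p : Int) (d : Int) : Bool :=
  if h : d * d ≤ p then
    if PySem.Int.mod p d == 0 then false else pvTrial p (d + 1)
  else decide (2 ≤ p)
termination_by (p + 1 - d).toNat
decreasing_by
  have hd : d ≤ p := by nlinarith [mul_self_nonneg d, mul_self_nonneg (d - 1)]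
  omega

def pvIsPrime (p : Int) : Bool := pvTrial p 2

-- inner loop: for q in primes[i:]: if p*q > N: break ; result.append(p*q)
def pvInnerB (N p : Int) : List Int → List Int
  | [] => []
  | q :: qs => if p * q > N then [] else p * q :: pvInnerB N p qs

-- outer loop: for i in range(len(primes)): p = primes[i]; if p*p > N: break ; <inner on primes[i:]>
def pvOuterB (N : Int) : List Int → List Int
  | [] => []
  | p :: ps => if p * p > N then [] else pvInnerB N p (p :: ps) ++ pvOuterB N ps

def semi_primes_alt (N : Int) : List Int :=
  let primes := (PySem.List.pyRange 2 (N + 1) 1).filter pvIsPrime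
  PySem.Set.ofList (pvOuterB N primes)

-- ===== PRECONDITION & SPEC =====
-- Pre_ excludes N ≤ 0, on which A raises IndexError while initializing sieve[0], sieve[1].
def Pre_semi_primes (N : Int) : Prop := 1 ≤ N
instance (N : Int) : Decidable (Pre_semi_primes N) := by unfold Pre_semi_primes; infer_instance
def pvWitness_semi_primes : Int := (30)

def Spec_semi_primes (N : Int) (out : List Int) : Prop := out = semi_primes_alt N
instance (N : Int) (out : List Int) : Decidable (Spec_semi_primes N out) := by unfold Spec_semi_primes; infer_instance

-- ===== CLAIM (what is proved, stated in full; the proofs are below) =====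
def Claim_equal_semi_primes : Prop := ∀ (N : Int), Dom_semi_primes N → Pre_semi_primes N → Spec_semi_primes N (semi_primes N)
-- ===== LEMMAS AND PROOFS =====

-- Bool-valued primality used by the proof-side reference list.
def prB (n : Int) : Bool := decide (2 ≤ n ∧ Nat.Prime n.natAbs)

-- reference list: A's insertion order, grouped by the smaller prime factor c
def specList (N : Int) (c : Int) : List Int :=
  if h : c * c < N + 1 then
    (if prB c then
      ((PySem.List.pyRange c (N + 1) 1).filter (fun k => prB k && decide (c * k ≤ N))).map
        (fun k => c * k)
     else []) ++ specList N (c + 1)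
  else []
termination_by (N + 1 - c).toNat
decreasing_by
  have hc : c < N + 1 := by nlinarith [mul_self_nonneg c, mul_self_nonneg (c - 1)]
  omega

theorem prB_iff (n : Int) : prB n = true ↔ 2 ≤ n ∧ Nat.Prime n.natAbs := by simp [prB]

theorem prB_trial (n : Int) :
    prB n = true ↔ (2 ≤ n ∧ ∀ d : Int, 2 ≤ d → d * d ≤ n → ¬ d ∣ n) := by
  rw [prB_iff]
  constructor
  · rintro ⟨h2, hp⟩
    refine ⟨h2, fun d hd hdd hdvd => ?_⟩
    have h1 : d.natAbs ∣ n.natAbs := Int.natAbs_dvd_natAbs.mpr hdvd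
    rcases (Nat.Prime.eq_one_or_self_of_dvd hp _ h1) with h | h
    · omega
    · have : d = n := by omega
      nlinarith
  · rintro ⟨h2, hnd⟩
    refine ⟨h2, ?_⟩
    by_contra hnp
    have hn1 : n.natAbs ≠ 1 := by omega
    have hpr := Nat.minFac_prime hn1
    have hdvd := Nat.minFac_dvd n.natAbs
    have hsq : n.natAbs.minFac * n.natAbs.minFac ≤ n.natAbs := by
      have := Nat.minFac_sq_le_self (by omega) hnp
      nlinarith [this]
    have h2d : (2 : Int) ≤ (n.natAbs.minFac : Int) := by exact_mod_cast hpr.two_le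
    refine hnd _ h2d ?_ ?_
    · have : ((n.natAbs.minFac * n.natAbs.minFac : Nat) : Int) ≤ ((n.natAbs : Nat) : Int) := by exact_mod_cast hsq
      push_cast at this; omega
    · have : (n.natAbs.minFac : Int) ∣ (n.natAbs : Int) := Int.natCast_dvd_natCast.mpr hdvd
      rwa [Int.natAbs_of_nonneg (by omega)] at this

theorem exists_prime_factor (n : Int) (h2 : 2 ≤ n) (h : prB n = false) :
    ∃ p : Int, prB p = true ∧ p ∣ n ∧ p * p ≤ n := by
  have hn1 : n.natAbs ≠ 1 := by omega
  have hnp : ¬ Nat.Prime n.natAbs := by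
    intro hp; rw [(by simp [prB_iff, h2, hp] : prB n = true)] at h; simp at h
  have hpr := Nat.minFac_prime hn1
  have hdvd := Nat.minFac_dvd n.natAbs
  have hsq : n.natAbs.minFac * n.natAbs.minFac ≤ n.natAbs := by
    have := Nat.minFac_sq_le_self (by omega) hnp
    nlinarith [this]
  refine ⟨(n.natAbs.minFac : Int), ?_, ?_, ?_⟩
  · rw [prB_iff]
    constructor
    · exact_mod_cast hpr.two_le
    · simpa using hpr
  · have : (n.natAbs.minFac : Int) ∣ (n.natAbs : Int) := Int.natCast_dvd_natCast.mpr hdvd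
    rwa [Int.natAbs_of_nonneg (by omega)] at this
  · have : ((n.natAbs.minFac * n.natAbs.minFac : Nat) : Int) ≤ ((n.natAbs : Nat) : Int) := by exact_mod_cast hsq
    push_cast at this; omega

theorem prime_no_small (j p : Int) (hj : prB j = true) (hp : prB p = true)
    (hdvd : p ∣ j) (hsq : p * p ≤ j) : False := by
  rw [prB_iff] at hj hp
  have h1 : p.natAbs ∣ j.natAbs := Int.natAbs_dvd_natAbs.mpr hdvd
  rcases Nat.Prime.eq_one_or_self_of_dvd hj.2 _ h1 with h | h
  · omega
  · have : p = j := by omega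
    nlinarith [hj.1, hp.1]

theorem uniq2 (a b a' b' : Int) (ha : prB a = true) (hb : prB b = true)
    (ha' : prB a' = true) (hb' : prB b' = true) (hab : a ≤ b) (hab' : a' ≤ b')
    (heq : a * b = a' * b') : a = a' ∧ b = b' := by
  rw [prB_iff] at ha hb ha' hb'
  have key : a = a' ∨ a = b' := by
    have hdvd : a ∣ a' * b' := heq ▸ Dvd.intro b rfl
    have : a.natAbs ∣ (a' * b').natAbs := Int.natAbs_dvd_natAbs.mpr hdvd
    rw [Int.natAbs_mul] at this
    rcases (Nat.Prime.dvd_mul ha.2).mp this with h | h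
    · left
      rcases Nat.Prime.eq_one_or_self_of_dvd ha'.2 _ h with h1 | h1 <;> omega
    · right
      rcases Nat.Prime.eq_one_or_self_of_dvd hb'.2 _ h with h1 | h1 <;> omega
  have key2 : a' = a ∨ a' = b := by
    have hdvd : a' ∣ a * b := heq ▸ Dvd.intro b' rfl
    have : a'.natAbs ∣ (a * b).natAbs := Int.natAbs_dvd_natAbs.mpr hdvd
    rw [Int.natAbs_mul] at this
    rcases (Nat.Prime.dvd_mul ha'.2).mp this with h | h
    · left
      rcases Nat.Prime.eq_one_or_self_of_dvd ha.2 _ h with h1 | h1 <;> omega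
    · right
      rcases Nat.Prime.eq_one_or_self_of_dvd hb.2 _ h with h1 | h1 <;> omega
  have haeq : a = a' := by
    rcases key with h | h
    · exact h
    · rcases key2 with h2 | h2 <;> omega
  refine ⟨haeq, ?_⟩
  have : a ≠ 0 := by omega
  subst haeq
  exact mul_left_cancel₀ this heq

theorem eq_of_pairwise_lt_of_mem {l₁ l₂ : List Int}
    (h1 : l₁.Pairwise (· < ·)) (h2 : l₂.Pairwise (· < ·))
    (h : ∀ x, x ∈ l₁ ↔ x ∈ l₂) : l₁ = l₂ := by
  have n1 : l₁.Nodup := h1.imp (fun hab => ne_of_lt hab)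
  have n2 : l₂.Nodup := h2.imp (fun hab => ne_of_lt hab)
  exact List.eq_of_perm_of_sorted (fun a b _ _ hab hba => absurd hba (not_lt.mpr hab.le))
    h1 h2 ((List.perm_ext_iff_of_nodup n1 n2).mpr h)

theorem range_mul (c a b : Int) (hc : 0 < c) (hb : 0 < b) :
    PySem.List.pyRange (c * a) b c =
      ((PySem.List.pyRange a b 1).filter (fun k => decide (c * k < b))).map (fun k => c * k) := by
  apply eq_of_pairwise_lt_of_mem
  · rw [PySem.List.pyRange_of_pos _ _ hc]
    refine List.Pairwise.map _ (fun x y hxy => ?_) (List.pairwise_lt_range)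
    have : (x : Int) < (y : Int) := by exact_mod_cast hxy
    nlinarith
  · exact List.Pairwise.map _ (fun x y (hxy : x < y) => by nlinarith)
      ((PySem.List.pairwise_lt_pyRange_one a b).filter _)
  · intro x
    rw [PySem.List.mem_pyRange_iff_of_pos hc]
    simp only [List.mem_map, List.mem_filter, PySem.List.mem_pyRange_one, decide_eq_true_eq]
    constructor
    · rintro ⟨hle, hlt, t, ht⟩
      refine ⟨a + t, ⟨⟨le_add_of_nonneg_right ?_, ?_⟩, ?_⟩, ?_⟩
      · nlinarith
      · nlinarith [mul_le_mul_of_nonneg_left (show (0:Int) ≤ t by nlinarith) hc.le]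
      · nlinarith
      · nlinarith
    · rintro ⟨k, ⟨⟨hak, hkb⟩, hckb⟩, rfl⟩
      exact ⟨by nlinarith, hckb, k - a, by ring⟩

theorem foldl_setzero (l : List Int) (S : List Int) (hl : ∀ i ∈ l, 0 ≤ i) :
    (l.foldl (fun s i => PySem.List.pySetD s i 0) S).length = S.length ∧
    ∀ j : Nat, j < S.length →
      (l.foldl (fun s i => PySem.List.pySetD s i 0) S).getD j 0 =
        if (j : Int) ∈ l then 0 else S.getD j 0 := by
  induction l generalizing S with
  | nil => simp
  | cons i t ih =>
    have hi : 0 ≤ i := hl i (by simp)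
    have hrec := ih (PySem.List.pySetD S i 0) (fun x hx => hl x (by simp [hx]))
    rw [PySem.List.pySetD_of_nonneg _ _ hi] at hrec
    constructor
    · simpa [List.foldl_cons, PySem.List.pySetD_of_nonneg _ _ hi] using hrec.1
    · intro j hj
      rw [List.foldl_cons, PySem.List.pySetD_of_nonneg _ _ hi,
        hrec.2 j (by simpa using hj)]
      by_cases hji : (j : Int) = i
      · have hij : i.toNat = j := by omega
        have hset : (S.set i.toNat 0).getD j 0 = 0 := by
          rw [hij, List.getD_eq_getElem?_getD]
          simp [List.getElem?_set, hj]
        rw [if_pos (show (j : Int) ∈ i :: t by simp [hji])]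
        by_cases hm : (j : Int) ∈ t
        · rw [if_pos hm]
        · rw [if_neg hm, hset]
      · have hne : i.toNat ≠ j := by omega
        have hset : (S.set i.toNat 0).getD j 0 = S.getD j 0 := by
          rw [List.getD_eq_getElem?_getD, List.getElem?_set_ne hne, ← List.getD_eq_getElem?_getD]
        rw [hset]
        by_cases hm : (j : Int) ∈ t
        · rw [if_pos hm, if_pos (by simp [hm])]
        · rw [if_neg hm, if_neg (by simp [hji, hm])]

theorem set_add_fresh {x : Int} (r : PySem.Set Int) (hx : x ∉ r) :
    PySem.Set.add r x = r ++ [x] := by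
  simp [PySem.Set.add, PySem.Set.contains, hx]

theorem foldl_add_if_fresh (p : Int → Bool) (f : Int → Int) :
    ∀ (l : List Int) (r : List Int),
      ((l.filter p).map f).Nodup → (∀ x ∈ (l.filter p).map f, x ∉ r) →
      l.foldl (fun r k => if p k then PySem.Set.add r (f k) else r) r =
        r ++ (l.filter p).map f := by
  intro l
  induction l with
  | nil => simp
  | cons i t ih =>
    intro r hnd hfresh
    by_cases hp : p i
    · rw [List.filter_cons_of_pos hp] at hnd hfresh ⊢
      rw [List.map_cons] at hnd hfresh ⊢
      have hnd' := List.nodup_cons.mp hnd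
      rw [List.foldl_cons, if_pos hp, set_add_fresh r (hfresh _ (by simp))]
      rw [ih (r ++ [f i]) hnd'.2 ?_]
      · simp
      · intro x hx
        simp only [List.mem_append, List.mem_singleton]
        rintro (hxr | rfl)
        · exact hfresh x (by simp [hx]) hxr
        · exact hnd'.1 hx
    · rw [List.filter_cons_of_neg (by simpa using hp)] at hnd hfresh ⊢
      rw [List.foldl_cons, if_neg hp]
      exact ih r hnd hfresh

theorem foldl_add_nodup : ∀ (l acc : List Int), (acc ++ l).Nodup →
    l.foldl PySem.Set.add acc = acc ++ l := by
  intro l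
  induction l with
  | nil => simp
  | cons i t ih =>
    intro acc hnd
    rw [List.foldl_cons, set_add_fresh acc (by
      intro h
      have := List.disjoint_of_nodup_append hnd
      exact this h (by simp))]
    rw [ih (acc ++ [i]) (by simpa using hnd)]
    simp

theorem takeWhile_eq_filter_of_sorted (p : Int → Bool) :
    ∀ (l : List Int), l.Pairwise (· < ·) →
      (∀ x y, x ∈ l → y ∈ l → x ≤ y → p y = true → p x = true) →
      l.takeWhile p = l.filter p := by
  intro l
  induction l with
  | nil => simp
  | cons i t ih =>
    intro hpw hmono
    by_cases hp : p i
    · rw [List.takeWhile_cons_of_pos hp, List.filter_cons_of_pos hp,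
        ih hpw.tail (fun x y hx hy => hmono x y (by simp [hx]) (by simp [hy]))]
    · rw [List.takeWhile_cons_of_neg (by simpa using hp), List.filter_cons_of_neg (by simpa using hp)]
      have : t.filter p = [] := by
        rw [List.filter_eq_nil_iff]
        intro y hy hpy
        exact hp (hmono i y (by simp) (by simp [hy]) (le_of_lt (List.rel_of_pairwise_cons hpw hy)) hpy)
      simp [this]

-- sieve invariants
def marked (c j : Int) : Prop := ∃ p : Int, prB p = true ∧ p < c ∧ p ∣ j ∧ p * p ≤ j

def sieveInv (N c : Int) (S : List Int) : Prop :=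
  S.length = (N + 1).toNat ∧ ∀ j : Nat, j < S.length →
    ((2 ≤ (j : Int) ∧ ¬ marked c (j : Int)) → S.getD j 0 = 1) ∧
    ((¬ 2 ≤ (j : Int) ∨ marked c (j : Int)) → S.getD j 0 = 0)

def sieveOK (N : Int) (S : List Int) : Prop :=
  S.length = (N + 1).toNat ∧ ∀ j : Nat, j < S.length → S.getD j 0 = if prB (j : Int) then 1 else 0

theorem small_factor_lt (p n : Int) (hp : prB p = true) (hsq : p * p ≤ n) : p < n := by
  have h2 : 2 ≤ p := ((prB_iff p).mp hp).1
  nlinarith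

theorem getD_if_prB (N c : Int) (S : List Int) (hc : 2 ≤ c) (hcN : c < N + 1) (hInv : sieveInv N c S) :
    S.getD c.toNat 0 = if prB c then 1 else 0 := by
  have hidx : c.toNat < S.length := by rw [hInv.1]; omega
  have hcast : ((c.toNat : Nat) : Int) = c := by omega
  by_cases hpc : prB c = true
  · rw [if_pos hpc]
    refine (hInv.2 c.toNat hidx).1 ⟨by omega, ?_⟩
    rw [hcast]
    rintro ⟨p, hp, -, hdvd, hsq⟩
    exact prime_no_small c p hpc hp hdvd hsq
  · rw [if_neg hpc]
    refine (hInv.2 c.toNat hidx).2 (Or.inr ?_)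
    rw [hcast]
    obtain ⟨p, hp, hdvd, hsq⟩ := exists_prime_factor c hc (by simpa using hpc)
    exact ⟨p, hp, small_factor_lt p c hp hsq, hdvd, hsq⟩

theorem pvMark_char (N c : Int) (S : List Int) (hc : 2 ≤ c) (hInv : sieveInv N c S) :
    sieveOK N (pvMark N S c) := by
  by_cases h : c * c < N + 1
  · rw [pvMark, dif_pos h]
    have hcN : c < N + 1 := by nlinarith [mul_self_nonneg c, mul_self_nonneg (c - 1)]
    have hget : PySem.List.pyGetD S c 0 = S.getD c.toNat 0 :=
      PySem.List.pyGetD_of_nonneg _ _ (by omega)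
    have hSc := getD_if_prB N c S hc hcN hInv
    have hdvd_iff : ∀ j : Int, j < N + 1 →
        ((j : Int) ∈ PySem.List.pyRange (c * c) (N + 1) c ↔ (c ∣ j ∧ c * c ≤ j)) := by
      intro j hjN
      rw [PySem.List.mem_pyRange_iff_of_pos (show (0:Int) < c by omega)]
      constructor
      · rintro ⟨h1, -, d, hd⟩
        exact ⟨⟨c + d, by linarith [hd]⟩, h1⟩
      · rintro ⟨⟨d, hd⟩, h1⟩
        exact ⟨h1, hjN, ⟨d - c, by rw [hd]; ring⟩⟩
    by_cases hpc : prB c = true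
    · have hbeq : (PySem.List.pyGetD S c 0 == 1) = true := by
        rw [hget, hSc, if_pos hpc]; rfl
      rw [if_pos hbeq]
      refine pvMark_char N (c + 1) _ (by omega) ?_
      have hnn : ∀ i ∈ PySem.List.pyRange (c * c) (N + 1) c, 0 ≤ i := by
        intro i hi
        have := (PySem.List.mem_pyRange_iff_of_pos (show (0:Int) < c by omega) i).mp hi
        nlinarith [this.1]
      obtain ⟨hlen, hval⟩ := foldl_setzero (PySem.List.pyRange (c * c) (N + 1) c) S hnn
      refine ⟨by rw [hlen, hInv.1], ?_⟩
      intro j hj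
      rw [hlen] at hj
      have hjN : (j : Int) < N + 1 := by have := hInv.1; omega
      have hmem_iff := hdvd_iff (j : Int) hjN
      constructor
      · rintro ⟨h2j, hno⟩
        rw [hval j hj, if_neg, ]
        · refine (hInv.2 j hj).1 ⟨h2j, ?_⟩
          rintro ⟨p, hp, hplt, hpd, hps⟩
          exact hno ⟨p, hp, by omega, hpd, hps⟩
        · intro hmem
          obtain ⟨hdj, hsq⟩ := hmem_iff.mp hmem
          exact hno ⟨c, hpc, by omega, hdj, hsq⟩
      · intro hbad
        rw [hval j hj]
        by_cases hmem : (j : Int) ∈ PySem.List.pyRange (c * c) (N + 1) c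
        · rw [if_pos hmem]
        · rw [if_neg hmem]
          refine (hInv.2 j hj).2 ?_
          rcases hbad with h2j | ⟨p, hp, hplt, hpd, hps⟩
          · exact Or.inl h2j
          · by_cases hpec : p = c
            · subst hpec
              exact absurd (hmem_iff.mpr ⟨hpd, hps⟩) hmem
            · exact Or.inr ⟨p, hp, by omega, hpd, hps⟩
    · have hbeq : (PySem.List.pyGetD S c 0 == 1) = false := by
        rw [hget, hSc, if_neg hpc]; rfl
      rw [hbeq]
      simp only [Bool.false_eq_true, if_false]
      refine pvMark_char N (c + 1) S (by omega) ?_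
      refine ⟨hInv.1, ?_⟩
      intro j hj
      constructor
      · rintro ⟨h2j, hno⟩
        refine (hInv.2 j hj).1 ⟨h2j, ?_⟩
        rintro ⟨p, hp, hplt, hpd, hps⟩
        exact hno ⟨p, hp, by omega, hpd, hps⟩
      · intro hbad
        refine (hInv.2 j hj).2 ?_
        rcases hbad with h2j | ⟨p, hp, hplt, hpd, hps⟩
        · exact Or.inl h2j
        · by_cases hpec : p = c
          · subst hpec; exact absurd hp hpc
          · exact Or.inr ⟨p, hp, by omega, hpd, hps⟩
  · rw [pvMark, dif_neg h]
    refine ⟨hInv.1, ?_⟩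
    intro j hj
    have hjN : (j : Int) < N + 1 := by have := hInv.1; omega
    by_cases h2j : 2 ≤ (j : Int)
    · by_cases hpj : prB (j : Int) = true
      · rw [if_pos hpj]
        refine (hInv.2 j hj).1 ⟨h2j, ?_⟩
        rintro ⟨p, hp, -, hpd, hps⟩
        exact prime_no_small _ p hpj hp hpd hps
      · rw [if_neg hpj]
        refine (hInv.2 j hj).2 (Or.inr ?_)
        obtain ⟨p, hp, hpd, hps⟩ := exists_prime_factor _ h2j (by simpa using hpj)
        have hp2 : 2 ≤ p := ((prB_iff p).mp hp).1
        have hplt : p < c := by nlinarith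
        exact ⟨p, hp, hplt, hpd, hps⟩
    · rw [if_neg (fun hpj => h2j ((prB_iff _).mp hpj).1)]
      exact (hInv.2 j hj).2 (Or.inl h2j)
termination_by (N + 1 - c).toNat
decreasing_by
  all_goals
    have hcN : c < N + 1 := by nlinarith [mul_self_nonneg c, mul_self_nonneg (c - 1)]
    omega

theorem init_inv (N : Int) (_hN : 1 ≤ N) :
    sieveInv N 2 (PySem.List.pySetD (PySem.List.pySetD (List.replicate (N + 1).toNat 1) 0 0) 1 0) := by
  rw [PySem.List.pySetD_of_nonneg _ _ (by omega : (0:Int) ≤ 0),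
    PySem.List.pySetD_of_nonneg _ _ (by omega : (0:Int) ≤ 1)]
  constructor
  · simp
  · intro j hj
    simp only [List.length_set, List.length_replicate] at hj
    have hchar : (((List.replicate (N + 1).toNat (1:Int)).set (Int.toNat 0) 0).set (Int.toNat 1) 0).getD j 0
        = if 2 ≤ (j : Int) then 1 else 0 := by
      rcases (by omega : j = 0 ∨ j = 1 ∨ 2 ≤ j) with rfl | rfl | hge
      · rw [List.getD_eq_getElem?_getD]
        simp [List.getElem?_set, hj]
      · rw [List.getD_eq_getElem?_getD]
        simp [List.getElem?_set, hj]
      · rw [List.getD_eq_getElem?_getD]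
        rw [List.getElem?_set_ne (by omega), List.getElem?_set_ne (by omega)]
        rw [List.getElem?_replicate_of_lt hj]
        simp only [Option.getD_some]
        rw [if_pos (by omega)]
    rw [hchar]
    constructor
    · rintro ⟨h2j, -⟩
      rw [if_pos h2j]
    · intro hbad
      rcases hbad with h2j | ⟨p, hp, hplt, -, -⟩
      · rw [if_neg h2j]
      · have := ((prB_iff p).mp hp).1; omega

def batch (N c : Int) : List Int :=
  ((PySem.List.pyRange c (N + 1) 1).filter (fun k => prB k && decide (c * k ≤ N))).map (fun k => c * k)

theorem pairwise_lt_batch (N c : Int) (hc : 0 < c) : (batch N c).Pairwise (· < ·) :=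
  List.Pairwise.map _ (fun x y (hxy : x < y) => by nlinarith)
    ((PySem.List.pairwise_lt_pyRange_one c (N + 1)).filter _)

theorem nodup_batch (N c : Int) (hc : 0 < c) : (batch N c).Nodup :=
  (pairwise_lt_batch N c hc).imp (fun hab => ne_of_lt hab)

theorem mem_batch {N c x : Int} (hc : 0 < c) :
    x ∈ batch N c ↔ ∃ k, prB k = true ∧ c ≤ k ∧ c * k ≤ N ∧ x = c * k := by
  unfold batch
  simp only [List.mem_map, List.mem_filter, PySem.List.mem_pyRange_one, Bool.and_eq_true,
    decide_eq_true_eq]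
  constructor
  · rintro ⟨k, ⟨⟨hck, -⟩, hk, hkN⟩, rfl⟩
    exact ⟨k, hk, hck, hkN, rfl⟩
  · rintro ⟨k, hk, hck, hkN, rfl⟩
    exact ⟨k, ⟨⟨hck, by nlinarith⟩, hk, hkN⟩, rfl⟩

theorem specList_unfold (N c : Int) :
    specList N c = if c * c < N + 1 then
      (if prB c then batch N c else []) ++ specList N (c + 1) else [] := by
  rw [specList]
  by_cases h : c * c < N + 1
  · rw [dif_pos h, if_pos h]; rfl
  · rw [dif_neg h, if_neg h]

theorem mem_specList (N c x : Int) (hc : 2 ≤ c) (hx : x ∈ specList N c) :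
    ∃ p k, prB p = true ∧ prB k = true ∧ p ≤ k ∧ c ≤ p ∧ x = p * k := by
  rw [specList_unfold] at hx
  by_cases h : c * c < N + 1
  · rw [if_pos h] at hx
    rcases List.mem_append.mp hx with hx | hx
    · by_cases hpc : prB c = true
      · rw [if_pos hpc] at hx
        obtain ⟨k, hk, hck, -, rfl⟩ := (mem_batch (by omega)).mp hx
        exact ⟨c, k, hpc, hk, hck, le_refl c, rfl⟩
      · rw [if_neg hpc] at hx; cases hx
    · obtain ⟨p, k, hp, hk, hpk, hcp, rfl⟩ := mem_specList N (c + 1) _ (by omega) hx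
      exact ⟨p, k, hp, hk, hpk, by omega, rfl⟩
  · rw [if_neg h] at hx; cases hx
termination_by (N + 1 - c).toNat
decreasing_by
  have hcN : c < N + 1 := by nlinarith [mul_self_nonneg c, mul_self_nonneg (c - 1)]
  omega

theorem pvCollect_char (N c : Int) (S r : List Int) (hc : 2 ≤ c) (hS : sieveOK N S)
    (hr : ∀ x ∈ r, ∃ p k, prB p = true ∧ prB k = true ∧ p ≤ k ∧ p < c ∧ x = p * k) :
    pvCollect N S c r = r ++ specList N c := by
  by_cases h : c * c < N + 1
  · rw [pvCollect, dif_pos h]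
    have hcN : c < N + 1 := by nlinarith [mul_self_nonneg c, mul_self_nonneg (c - 1)]
    have hget : PySem.List.pyGetD S c 0 = S.getD c.toNat 0 :=
      PySem.List.pyGetD_of_nonneg _ _ (by omega)
    have hcast : ((c.toNat : Nat) : Int) = c := by omega
    have hidx : c.toNat < S.length := by rw [hS.1]; omega
    have hSc : S.getD c.toNat 0 = if prB c then 1 else 0 := by
      rw [hS.2 c.toNat hidx, hcast]
    by_cases hpc : prB c = true
    · have hbeq : (PySem.List.pyGetD S c 0 == 1) = true := by
        rw [hget, hSc, if_pos hpc]; rfl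
      rw [if_pos hbeq]
      have hrange := range_mul c c (N + 1) (by omega) (by nlinarith [mul_self_nonneg c])
      rw [hrange, List.foldl_map]
      set fl := (PySem.List.pyRange c (N + 1) 1).filter (fun k => decide (c * k < N + 1)) with hfl
      have hcond : ∀ (acc : List Int) (k : Int), k ∈ fl →
          (if (PySem.Int.mod (c * k) c == 0 &&
              (PySem.List.pyGetD S (PySem.Int.truncdiv (c * k) c) 0 == 1)) = true then
            PySem.Set.add acc (c * k) else acc) =
          (if prB k then PySem.Set.add acc (c * k) else acc) := by
        intro acc k hk
        rw [hfl, List.mem_filter] at hk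
        have hkr := (PySem.List.mem_pyRange_one).mp hk.1
        have hckN : c * k < N + 1 := by simpa using hk.2
        have hmod : PySem.Int.mod (c * k) c = 0 :=
          (PySem.Int.mod_eq_zero_iff_dvd _ _).mpr (dvd_mul_right c k)
        have htd : PySem.Int.truncdiv (c * k) c = k := by
          unfold PySem.Int.truncdiv
          exact Int.mul_tdiv_cancel_left _ (by omega)
        have hkidx : k.toNat < S.length := by rw [hS.1]; omega
        have hkcast : ((k.toNat : Nat) : Int) = k := by omega
        have hgk : PySem.List.pyGetD S k 0 = if prB k then 1 else 0 := by
          rw [PySem.List.pyGetD_of_nonneg _ _ (by omega), hS.2 k.toNat hkidx, hkcast]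
        rw [hmod, htd, hgk]
        by_cases hk' : prB k = true
        · rw [if_pos hk', if_pos hk']; rfl
        · rw [if_neg hk', if_neg hk']; rfl
      rw [PySem.List.foldl_congr_mem fl _
        (fun acc k => if prB k then PySem.Set.add acc (c * k) else acc) r hcond]
      have hflb : fl.filter prB = (PySem.List.pyRange c (N + 1) 1).filter (fun k => prB k && decide (c * k ≤ N)) := by
        rw [hfl, List.filter_filter]
        refine List.filter_congr ?_
        intro k hk
        have hdec : decide (c * k < N + 1) = decide (c * k ≤ N) :=
          decide_eq_decide.mpr (by omega)
        by_cases hk' : prB k = true <;> simp [hk', hdec]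
      have hnodup : ((fl.filter prB).map (fun k => c * k)).Nodup := by
        rw [hflb]
        exact nodup_batch N c (by omega)
      have hfresh : ∀ x ∈ (fl.filter prB).map (fun k => c * k), x ∉ r := by
        rw [hflb]
        intro x hx hxr
        obtain ⟨k, hk, hck, -, rfl⟩ := (mem_batch (by omega)).mp hx
        obtain ⟨p, k', hp, hk', hpk', hplt, heq⟩ := hr _ hxr
        have := uniq2 c k p k' hpc hk hp hk' (by omega) hpk' heq
        omega
      have hflb2 : (fl.filter prB).map (fun k => c * k) = batch N c := by
        rw [hflb]; rfl
      rw [foldl_add_if_fresh prB (fun k => c * k) fl r hnodup hfresh]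
      rw [hflb2]
      rw [pvCollect_char N (c + 1) S (r ++ batch N c) (by omega) hS ?_]
      · rw [specList_unfold N c, if_pos h, if_pos hpc, List.append_assoc]
      · intro x hx
        rcases List.mem_append.mp hx with hx | hx
        · obtain ⟨p, k', hp, hk', hpk', hplt, heq⟩ := hr _ hx
          exact ⟨p, k', hp, hk', hpk', by omega, heq⟩
        · obtain ⟨k, hk, hck, -, rfl⟩ := (mem_batch (by omega)).mp hx
          exact ⟨c, k, hpc, hk, hck, by omega, rfl⟩
    · have hbeq : (PySem.List.pyGetD S c 0 == 1) = false := by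
        rw [hget, hSc, if_neg hpc]; rfl
      rw [hbeq]
      simp only [Bool.false_eq_true, if_false]
      rw [pvCollect_char N (c + 1) S r (by omega) hS
        (fun x hx => by
          obtain ⟨p, k', hp, hk', hpk', hplt, heq⟩ := hr _ hx
          exact ⟨p, k', hp, hk', hpk', by omega, heq⟩)]
      rw [specList_unfold N c, if_pos h, if_neg hpc, List.nil_append]
  · rw [pvCollect, dif_neg h, specList_unfold N c, if_neg h, List.append_nil]
termination_by (N + 1 - c).toNat
decreasing_by
  all_goals
    have hcN : c < N + 1 := by nlinarith [mul_self_nonneg c, mul_self_nonneg (c - 1)]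
    omega

theorem pvTrial_iff (p d : Int) (hd : 2 ≤ d) :
    pvTrial p d = true ↔ (2 ≤ p ∧ ∀ e : Int, d ≤ e → e * e ≤ p → ¬ e ∣ p) := by
  by_cases h : d * d ≤ p
  · rw [pvTrial, dif_pos h]
    by_cases hm : PySem.Int.mod p d = 0
    · have hdvd : d ∣ p := (PySem.Int.mod_eq_zero_iff_dvd _ _).mp hm
      rw [if_pos (by rw [hm]; rfl)]
      constructor
      · intro hfalse; cases hfalse
      · rintro ⟨-, hno⟩
        exact absurd hdvd (hno d (le_refl d) h)
    · rw [if_neg (by simpa using hm)]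
      rw [pvTrial_iff p (d + 1) (by omega)]
      have hnd : ¬ d ∣ p := fun hdvd => hm ((PySem.Int.mod_eq_zero_iff_dvd _ _).mpr hdvd)
      constructor
      · rintro ⟨h2p, hno⟩
        refine ⟨h2p, fun e he hee => ?_⟩
        by_cases hed : e = d
        · subst hed; exact hnd
        · exact hno e (by omega) hee
      · rintro ⟨h2p, hno⟩
        exact ⟨h2p, fun e he hee => hno e (by omega) hee⟩
  · rw [pvTrial, dif_neg h]
    constructor
    · intro h2p
      refine ⟨by simpa using h2p, fun e he hee hdvd => ?_⟩
      have : d * d ≤ e * e := by nlinarith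
      omega
    · rintro ⟨h2p, -⟩
      simpa using h2p
termination_by (p + 1 - d).toNat
decreasing_by
  have hdp : d ≤ p := by nlinarith [mul_self_nonneg d, mul_self_nonneg (d - 1)]
  omega

theorem pvIsPrime_eq (p : Int) : pvIsPrime p = prB p := by
  have h1 := pvTrial_iff p 2 (le_refl 2)
  have h2 := prB_trial p
  unfold pvIsPrime
  by_cases hp : prB p = true
  · rw [hp]
    exact h1.mpr (h2.mp hp)
  · rw [Bool.eq_false_iff.mpr hp]
    rw [Bool.eq_false_iff]
    intro ht
    exact hp (h2.mpr (h1.mp ht))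

theorem innerB_eq (N p : Int) : ∀ l : List Int,
    pvInnerB N p l = (l.takeWhile (fun q => decide (p * q ≤ N))).map (fun q => p * q) := by
  intro l
  induction l with
  | nil => rfl
  | cons q qs ih =>
    rw [pvInnerB]
    by_cases hq : p * q > N
    · rw [if_pos hq, List.takeWhile_cons_of_neg (by simpa using hq)]
      rfl
    · rw [if_neg hq, List.takeWhile_cons_of_pos (by simpa using hq), List.map_cons, ih]

theorem primes_tail (N c : Int) (hc : c * c < N + 1) :
    (PySem.List.pyRange c (N + 1) 1).filter prB =
      (if prB c then [c] else []) ++ (PySem.List.pyRange (c + 1) (N + 1) 1).filter prB := by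
  have hcN : c < N + 1 := by nlinarith [mul_self_nonneg c, mul_self_nonneg (c - 1)]
  rw [PySem.List.pyRange_one_cons hcN, List.filter_cons]
  by_cases hpc : prB c = true <;> simp [hpc]

theorem mem_primes_ge {N c k : Int} (hk : k ∈ (PySem.List.pyRange c (N + 1) 1).filter prB) :
    c ≤ k ∧ k < N + 1 ∧ prB k = true := by
  rw [List.mem_filter, PySem.List.mem_pyRange_one] at hk
  exact ⟨hk.1.1, hk.1.2, hk.2⟩

theorem outerB_eq (N c : Int) (hc : 2 ≤ c) :
    pvOuterB N ((PySem.List.pyRange c (N + 1) 1).filter prB) = specList N c := by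
  by_cases h : c * c < N + 1
  · rw [primes_tail N c h]
    by_cases hpc : prB c = true
    · rw [if_pos hpc]
      have hl : [c] ++ (PySem.List.pyRange (c + 1) (N + 1) 1).filter prB =
          c :: (PySem.List.pyRange (c + 1) (N + 1) 1).filter prB := rfl
      rw [hl, pvOuterB]
      rw [if_neg (by omega : ¬ c * c > N)]
      rw [outerB_eq N (c + 1) (by omega)]
      rw [specList_unfold N c, if_pos h, if_pos hpc]
      congr 1
      -- inner list equals batch
      rw [show (c :: (PySem.List.pyRange (c + 1) (N + 1) 1).filter prB)
            = (PySem.List.pyRange c (N + 1) 1).filter prB by rw [primes_tail N c h, if_pos hpc]; rfl]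
      rw [innerB_eq]
      have hsorted : ((PySem.List.pyRange c (N + 1) 1).filter prB).Pairwise (· < ·) :=
        (PySem.List.pairwise_lt_pyRange_one c (N + 1)).filter _
      rw [takeWhile_eq_filter_of_sorted _ _ hsorted ?mono]
      case mono =>
        intro x y hx hy hxy hpy
        have hx' := mem_primes_ge hx
        have hy' := mem_primes_ge hy
        simp only [decide_eq_true_eq] at hpy ⊢
        nlinarith [hx'.1, hy'.1]
      rw [List.filter_filter]
      rw [List.filter_congr (fun k _ => Bool.and_comm (decide (c * k ≤ N)) (prB k))]
      rfl
    · rw [if_neg hpc, List.nil_append, outerB_eq N (c + 1) (by omega)]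
      rw [specList_unfold N c, if_pos h, if_neg hpc, List.nil_append]
  · rw [specList_unfold N c, if_neg h]
    cases hl : (PySem.List.pyRange c (N + 1) 1).filter prB with
    | nil => rfl
    | cons p ps =>
      rw [pvOuterB, if_pos ?ppos]
      case ppos =>
        have hp := mem_primes_ge (hl ▸ List.mem_cons_self (l := ps) (a := p))
        nlinarith [hp.1]
termination_by (N + 1 - c).toNat
decreasing_by
  all_goals
    have hcN : c < N + 1 := by nlinarith [mul_self_nonneg c, mul_self_nonneg (c - 1)]
    omega

theorem nodup_specList (N c : Int) (hc : 2 ≤ c) : (specList N c).Nodup := by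
  rw [specList_unfold]
  by_cases h : c * c < N + 1
  · rw [if_pos h]
    rw [List.nodup_append]
    refine ⟨?_, nodup_specList N (c + 1) (by omega), ?_⟩
    · by_cases hpc : prB c = true
      · rw [if_pos hpc]; exact nodup_batch N c (by omega)
      · rw [if_neg hpc]; exact List.nodup_nil
    · intro a ha b hb hab
      by_cases hpc : prB c = true
      · rw [if_pos hpc] at ha
        obtain ⟨k, hk, hck, -, rfl⟩ := (mem_batch (by omega)).mp ha
        obtain ⟨p, k', hp, hk', hpk', hcp, heq⟩ := mem_specList N (c + 1) b (by omega) hb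
        rw [← hab] at heq
        have := uniq2 c k p k' hpc hk hp hk' (by omega) hpk' heq
        omega
      · rw [if_neg hpc] at ha; cases ha
  · rw [if_neg h]; exact List.nodup_nil
termination_by (N + 1 - c).toNat
decreasing_by
  all_goals
    have hcN : c < N + 1 := by nlinarith [mul_self_nonneg c, mul_self_nonneg (c - 1)]
    omega

theorem ofList_nodup (l : List Int) (h : l.Nodup) : PySem.Set.ofList l = l := by
  rw [PySem.Set.ofList_eq_foldl]
  have := foldl_add_nodup l [] (by simpa using h)
  simpa using this

theorem semi_primes_A_eq_spec (N : Int) (hN : 1 ≤ N) : semi_primes N = specList N 2 := by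
  unfold semi_primes
  have hOK := pvMark_char N 2 _ (by omega) (init_inv N hN)
  rw [pvCollect_char N 2 _ PySem.Set.empty (by omega) hOK
    (by intro x hx; simp [PySem.Set.empty] at hx)]
  simp [PySem.Set.empty]

theorem semi_primes_B_eq_spec (N : Int) (_hN : 1 ≤ N) : semi_primes_alt N = specList N 2 := by
  show PySem.Set.ofList (pvOuterB N ((PySem.List.pyRange 2 (N + 1) 1).filter pvIsPrime)) = specList N 2
  rw [List.filter_congr (fun x _ => pvIsPrime_eq x)]
  rw [outerB_eq N 2 (le_refl 2)]
  exact ofList_nodup _ (nodup_specList N 2 (le_refl 2))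

-- ===== VERDICT (by name: the statement is the Claim_ definition above) =====
theorem semi_primes_spec : Claim_equal_semi_primes := by
  intro N _ hPre
  unfold Spec_semi_primes
  rw [semi_primes_A_eq_spec N hPre, semi_primes_B_eq_spec N hPre]
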